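-- pv_equiv track=rewrite | github.com/walidabualafia/hyde | testing/tweets-test.py | proc_tweet
-- ===== SOURCE A (Python) =====
-- def proc_tweet(tweet):
--     """
--     Preprocess the tweet by replacing usernames and
--     URLs with generic placeholders.
--     """
--     tweet_words = []
--
--     for word in tweet.split(' '):
--         if word.startswith('@') and len(word) > 1:
--             word = '@user'
--         elif word.startswith('http'):
--             word = 'http'
--         tweet_words.append(word)
--
--     return " ".join(tweet_words)
-- ===== SOURCE B (Python) =====
-- def proc_tweet(tweet):
--     """
--     Preprocess the tweet by replacing usernames and
--     URLs with generic placeholders.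
--
--     Single left-to-right scan: no split list is built; spaces are
--     copied through and each maximal run of non-space characters is
--     rewritten in place.
--     """
--     out = []
--     i = 0
--     n = len(tweet)
--     while i < n:
--         if tweet[i] == ' ':
--             out.append(' ')
--             i += 1
--         else:
--             j = i
--             while j < n and tweet[j] != ' ':
--                 j += 1
--             tok = tweet[i:j]
--             if tok.startswith('@') and len(tok) > 1:
--                 out.append('@user')
--             elif tok.startswith('http'):
--                 out.append('http')
--             else:
--                 out.append(tok)
--             i = j
--     return ''.join(out)
-- ===== Notes on version B (the rewrite author's own statement) =====
-- stated objective: alternative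
-- what changed: Replaces the split/map/join pipeline with a single left-to-right scan that copies space characters through and rewrites each maximal non-space run in place, building no token list.
import Mathlib
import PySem

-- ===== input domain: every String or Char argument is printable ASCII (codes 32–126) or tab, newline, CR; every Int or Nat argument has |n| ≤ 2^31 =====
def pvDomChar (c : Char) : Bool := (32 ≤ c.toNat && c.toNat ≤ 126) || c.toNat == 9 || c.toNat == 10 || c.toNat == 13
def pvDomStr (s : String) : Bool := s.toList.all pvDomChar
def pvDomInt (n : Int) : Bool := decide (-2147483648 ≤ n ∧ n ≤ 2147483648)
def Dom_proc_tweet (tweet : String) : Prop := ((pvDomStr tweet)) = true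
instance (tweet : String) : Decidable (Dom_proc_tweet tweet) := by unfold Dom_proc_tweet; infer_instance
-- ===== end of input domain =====

-- B replaces the split/map/join pipeline with a single scan rewriting each maximal non-space run in place (alternative decomposition, same cost).


-- ===== PORT A =====
-- the body of A's for-loop: rewrite one word
def procWordA (w : String) : String :=
  if PySem.Str.startswith w "@" && decide (1 < PySem.Str.len w) then "@user"
  else if PySem.Str.startswith w "http" then "http"
  else w

-- split(' ') / append-loop / ' '.join, transliterated
def proc_tweet (tweet : String) : String :=
  PySem.Str.join " "
    (((PySem.Str.split? tweet " ").getD []).foldl (fun acc w => acc ++ [procWordA w]) [])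

-- ===== PORT B =====
-- rewrite one maximal non-space run (Source B's if/elif/else on tok, on char lists)
def procTokB (tok : List Char) : List Char :=
  if PySem.Chars.startswith tok ['@'] && decide (1 < tok.length) then "@user".toList
  else if PySem.Chars.startswith tok "http".toList then "http".toList
  else tok

-- Source B's outer while-loop: copy a space, or consume the maximal non-space run
def scanB : List Char → List Char
  | [] => []
  | c :: rest =>
    if c = ' ' then ' ' :: scanB rest
    else procTokB (c :: rest.takeWhile (· ≠ ' ')) ++ scanB (rest.dropWhile (· ≠ ' '))
termination_by l => l.length
decreasing_by
  · simp
  · simpa using Nat.lt_succ_of_le (List.length_dropWhile_le _ _)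

def proc_tweet_alt (tweet : String) : String := String.ofList (scanB tweet.toList)

-- ===== PRECONDITION & SPEC =====
def Spec_proc_tweet (tweet : String) (out : String) : Prop := out = proc_tweet_alt tweet
instance (tweet : String) (out : String) : Decidable (Spec_proc_tweet tweet out) := by unfold Spec_proc_tweet; infer_instance

-- ===== CLAIM (what is proved, stated in full; the proofs are below) =====
def Claim_equal_proc_tweet : Prop := ∀ (tweet : String), Dom_proc_tweet tweet → Spec_proc_tweet tweet (proc_tweet tweet)

-- ===== LEMMAS AND PROOFS =====

-- pure split on ' ' in the token-jump shape of scanB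
def wsplit : List Char → List (List Char)
  | [] => [[]]
  | c :: cs =>
    match _h : (c :: cs).dropWhile (· ≠ ' ') with
    | [] => [(c :: cs).takeWhile (· ≠ ' ')]
    | _ :: rest => (c :: cs).takeWhile (· ≠ ' ') :: wsplit rest
termination_by l => l.length
decreasing_by
  have := List.length_dropWhile_le (fun x => decide (x ≠ ' ')) (c :: cs)
  rw [_h] at this; simp at this ⊢; omega

theorem wsplit_nil : wsplit [] = [[]] := by rw [wsplit.eq_def]

theorem wsplit_cons_of_drop_nil (c : Char) (cs : List Char)
    (h : (c :: cs).dropWhile (· ≠ ' ') = []) :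
    wsplit (c :: cs) = [(c :: cs).takeWhile (· ≠ ' ')] := by
  rw [wsplit.eq_def]; dsimp only; split
  · rfl
  · rename_i d rest hd; rw [h] at hd; cases hd

theorem wsplit_cons_of_drop_cons (c : Char) (cs : List Char) (d : Char) (rest : List Char)
    (h : (c :: cs).dropWhile (· ≠ ' ') = d :: rest) :
    wsplit (c :: cs) = (c :: cs).takeWhile (· ≠ ' ') :: wsplit rest := by
  rw [wsplit.eq_def]; dsimp only; split
  · rename_i hd; rw [h] at hd; cases hd
  · rename_i d' rest' hd; rw [h] at hd
    cases hd; rfl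

theorem wsplit_ne_nil (l : List Char) : wsplit l ≠ [] := by
  match l with
  | [] => rw [wsplit_nil]; simp
  | c :: cs =>
    rcases h : (c :: cs).dropWhile (· ≠ ' ') with _ | ⟨d, rest⟩
    · rw [wsplit_cons_of_drop_nil c cs h]; simp
    · rw [wsplit_cons_of_drop_cons c cs d rest h]; simp

theorem dropWhile_head_space (l : List Char) (d : Char) (rest : List Char)
    (h : l.dropWhile (· ≠ ' ') = d :: rest) : d = ' ' := by
  induction l with
  | nil => simp at h
  | cons a as ih =>
    rw [List.dropWhile_cons] at h
    by_cases ha : (decide (a ≠ ' ')) = true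
    · rw [if_pos ha] at h; exact ih h
    · rw [if_neg ha] at h
      injection h with h1 _
      subst h1
      simpa using ha

theorem foldl_append_map {α β : Type} (f : α → β) (xs : List α) (acc : List β) :
    xs.foldl (fun acc w => acc ++ [f w]) acc = acc ++ xs.map f := by
  induction xs generalizing acc with
  | nil => simp
  | cons x xs ih => simp [List.foldl, ih]

-- splitOn.go with singleton separator computes wsplit
theorem go_eq_wsplit (l : List Char) : ∀ (fuel : Nat) (cur : List Char)
    (acc : List (List Char)), l.length < fuel →
    PySem.Chars.splitOn.go [' '] fuel l cur acc =
      acc.reverse ++ (match wsplit l with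
        | [] => []
        | t :: ts => (cur.reverse ++ t) :: ts) := by
  induction l with
  | nil =>
    intro fuel cur acc hf
    match fuel with
    | f + 1 => rw [wsplit_nil]; simp [PySem.Chars.splitOn.go]
  | cons c rest ih =>
    intro fuel cur acc hf
    match fuel with
    | f + 1 =>
      by_cases hc : c = ' '
      · subst hc
        have hpre : List.isPrefixOf [' '] (' ' :: rest) = true := by
          simp [List.isPrefixOf]
        rw [PySem.Chars.splitOn.go]
        simp only [hpre, if_pos]
        have hdrop : List.drop [' '].length (' ' :: rest) = rest := rfl
        rw [hdrop, ih f [] (cur.reverse :: acc) (by simpa using hf)]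
        have hdw : (' ' :: rest).dropWhile (· ≠ ' ') = ' ' :: rest := by
          simp [List.dropWhile]
        rw [wsplit_cons_of_drop_cons ' ' rest ' ' rest hdw]
        have htk : (' ' :: rest).takeWhile (· ≠ ' ') = [] := by
          simp [List.takeWhile]
        rw [htk]
        rcases h : wsplit rest with _ | ⟨t, ts⟩
        · exact absurd h (wsplit_ne_nil rest)
        · simp
      · have hpre : List.isPrefixOf [' '] (c :: rest) = false := by
          simp [List.isPrefixOf]; intro h; exact absurd h.symm hc
        rw [PySem.Chars.splitOn.go]
        simp only [hpre, Bool.false_eq_true, if_false]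
        rw [ih f (c :: cur) acc (by simpa using hf)]
        have htk : (c :: rest).takeWhile (· ≠ ' ') = c :: rest.takeWhile (· ≠ ' ') := by
          simp [List.takeWhile, hc]
        have hdw : (c :: rest).dropWhile (· ≠ ' ') = rest.dropWhile (· ≠ ' ') := by
          simp [List.dropWhile, hc]
      -- compute wsplit (c :: rest) in terms of wsplit rest
        rcases hr : rest.dropWhile (· ≠ ' ') with _ | ⟨d, ds⟩
        · -- no space in rest: both sides are a single token
          have hrt : rest.takeWhile (· ≠ ' ') = rest := by
            have := List.takeWhile_append_dropWhile (p := (· ≠ ' ')) (l := rest)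
            rw [hr] at this; simpa using this
          rw [wsplit_cons_of_drop_nil c rest (hdw.trans hr), htk, hrt]
          rcases rest with _ | ⟨e, es⟩
          · rw [wsplit_nil]; simp
          · have hre : (e :: es).takeWhile (· ≠ ' ') = e :: es := hrt
            rw [wsplit_cons_of_drop_nil e es hr, hre]
            simp
        · rw [wsplit_cons_of_drop_cons c rest d ds (hdw.trans hr), htk]
          rcases rest with _ | ⟨e, es⟩
          · simp at hr
          · rw [wsplit_cons_of_drop_cons e es d ds hr]
            simp

theorem splitOn_eq_wsplit (l : List Char) :
    PySem.Chars.splitOn l [' '] = wsplit l := by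
  unfold PySem.Chars.splitOn
  rw [go_eq_wsplit l (l.length + 1) [] [] (by omega)]
  rcases h : wsplit l with _ | ⟨t, ts⟩
  · exact absurd h (wsplit_ne_nil l)
  · simp

-- scanB computes the join of the rewritten wsplit tokens
theorem scanB_eq_join (l : List Char) :
    scanB l = PySem.Chars.join [' '] ((wsplit l).map procTokB) := by
  induction l using wsplit.induct with
  | case1 =>
    rw [wsplit_nil]
    simp [scanB, PySem.Chars.join, procTokB, PySem.Chars.startswith, List.isPrefixOf,
      List.intercalate]
  | case2 c cs h =>
    have htk : (c :: cs).takeWhile (· ≠ ' ') = c :: cs := by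
      have := List.takeWhile_append_dropWhile (p := (· ≠ ' ')) (l := c :: cs)
      rw [h] at this; simpa using this
    by_cases hc : c = ' '
    · subst hc; simp [List.dropWhile] at h
    · have hdw0 : cs.dropWhile (· ≠ ' ') = [] := by
        have : (c :: cs).dropWhile (· ≠ ' ') = cs.dropWhile (· ≠ ' ') := by
          simp [List.dropWhile, hc]
        rw [← this, h]
      have htk0 : cs.takeWhile (· ≠ ' ') = cs := by
        have := List.takeWhile_append_dropWhile (p := (· ≠ ' ')) (l := cs)
        rw [hdw0] at this; simpa using this
      rw [scanB, if_neg hc, htk0, hdw0, scanB]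
      rw [wsplit_cons_of_drop_nil c cs h, htk]
      simp [PySem.Chars.join, List.intercalate]
  | case3 c cs d rest h ih =>
    have hd : d = ' ' := dropWhile_head_space (c :: cs) d rest h
    subst hd
    by_cases hc : c = ' '
    · subst hc
      have hxs : cs = rest := by
        rw [List.dropWhile_cons, if_neg (by simp)] at h
        simpa using h
      rw [scanB, if_pos rfl]
      have hdw : (' ' :: cs).dropWhile (· ≠ ' ') = ' ' :: cs := by
        rw [List.dropWhile_cons, if_neg (by simp)]
      rw [wsplit_cons_of_drop_cons ' ' cs ' ' cs hdw]
      have htk : (' ' :: cs).takeWhile (· ≠ ' ') = [] := by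
        rw [List.takeWhile_cons, if_neg (by simp)]
      rw [htk, hxs, ih]
      rcases hr : wsplit rest with _ | ⟨t, ts⟩
      · exact absurd hr (wsplit_ne_nil rest)
      · have hpe : procTokB [] = [] := by decide
        simp [hpe, PySem.Chars.join, List.intercalate]
    · have hdw : (c :: cs).dropWhile (· ≠ ' ') = cs.dropWhile (· ≠ ' ') := by
        simp [List.dropWhile, hc]
      have h' : cs.dropWhile (· ≠ ' ') = ' ' :: rest := by rw [← hdw, h]
      have htk : (c :: cs).takeWhile (· ≠ ' ') = c :: cs.takeWhile (· ≠ ' ') := by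
        simp [List.takeWhile, hc]
      rw [scanB, if_neg hc, h', scanB, if_pos rfl]
      rw [wsplit_cons_of_drop_cons c cs ' ' rest h, htk, ih]
      rcases hr : wsplit rest with _ | ⟨t, ts⟩
      · exact absurd hr (wsplit_ne_nil rest)
      · simp [PySem.Chars.join, List.intercalate]

-- the two word rewriters agree through toList
theorem procWordA_toList (w : String) :
    (procWordA w).toList = procTokB w.toList := by
  unfold procWordA procTokB
  have hs : PySem.Str.startswith w "@" = PySem.Chars.startswith w.toList ['@'] := rfl
  have hh : PySem.Str.startswith w "http" = PySem.Chars.startswith w.toList "http".toList := rfl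
  have hl : decide (1 < PySem.Str.len w) = decide (1 < w.toList.length) := by
    rw [decide_eq_decide]; unfold PySem.Str.len; omega
  rw [hs, hh, hl]
  by_cases h1 : (PySem.Chars.startswith w.toList ['@'] && decide (1 < w.toList.length)) = true
  · rw [if_pos h1, if_pos h1]
  · rw [if_neg h1, if_neg h1]
    by_cases h2 : PySem.Chars.startswith w.toList "http".toList = true
    · rw [if_pos h2, if_pos h2]
    · rw [if_neg h2, if_neg h2]

-- ===== VERDICT (by name: the statement is the Claim_ definition above) =====
theorem proc_tweet_spec : Claim_equal_proc_tweet := by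
  intro tweet _
  unfold Spec_proc_tweet proc_tweet proc_tweet_alt
  have hsplit : (PySem.Str.split? tweet " ").getD []
      = (PySem.Chars.splitOn tweet.toList [' ']).map String.ofList := by
    simp [PySem.Str.split?, PySem.Chars.split?]
  rw [hsplit, foldl_append_map, List.nil_append, splitOn_eq_wsplit, scanB_eq_join]
  unfold PySem.Str.join
  congr 1
  have : (" " : String).toList = [' '] := rfl
  rw [this]
  congr 1
  rw [List.map_map, List.map_map]
  apply List.map_congr_left
  intro t _
  show (procWordA (String.ofList t)).toList = procTokB t
  rw [procWordA_toList]
  congr 1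
  exact String.toList_ofList
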